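-- pv_equiv track=rewrite | github.com/rxdcxdrnine/problem-solving | python/boj/BOJ_14502.py | solution
-- ===== SOURCE A (Python) =====
-- import copy
-- import itertools
-- from collections import deque
-- from typing import List, Tuple, Deque
--
-- def solution(grid: List[List[int]]) -> int:
--     n, m = len(grid), len(grid[0])
--     dr = [-1, 0, 1, 0]  # [north, west, south, east]
--     dc = [0, -1, 0, 1]
--
--     zeros: List[Tuple[int, int]] = []
--     twos: List[Tuple[int, int]] = []
--
--     for i in range(n):
--         for j in range(m):
--             if grid[i][j] == 0:
--                 zeros.append((i, j))
--             if grid[i][j] == 2: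
--                 twos.append((i, j))
--
--     max_count: int = 0
--     for p1, p2, p3 in itertools.combinations(zeros, 3):
--         arr: List[List[int]] = copy.deepcopy(grid)
--         arr[p1[0]][p1[1]] = 1
--         arr[p2[0]][p2[1]] = 1
--         arr[p3[0]][p3[1]] = 1
--
--         queue: Deque[Tuple[int, int]] = deque()
--         for point in twos:
--             queue.append(point)
--
--         while queue:
--             r, c = queue.popleft()
--
--             for i in range(4):
--                 nr: int = r + dr[i]
--                 nc: int = c + dc[i]
--
--                 if 0 <= nr < n and 0 <= nc < m and arr[nr][nc] == 0:
--                     arr[nr][nc] = 2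
--                     queue.append((nr, nc))
--
--         count: int = 0
--         for r in range(n):
--             for c in range(m):
--                 if arr[r][c] == 0:
--                     count += 1
--
--         max_count = max(max_count, count)
--
--     return max_count
-- ===== SOURCE B (Python) =====
-- import itertools
-- from typing import List
--
--
-- def solution(grid: List[List[int]]) -> int:
--     n, m = len(grid), len(grid[0])
--     zeros = [(i, j) for i in range(n) for j in range(m) if grid[i][j] == 0]
--     twos = [(i, j) for i in range(n) for j in range(m) if grid[i][j] == 2]
--
--     def spread(arr, r, c):
--         for dr, dc in ((-1, 0), (0, -1), (1, 0), (0, 1)):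
--             nr, nc = r + dr, c + dc
--             if 0 <= nr < n and 0 <= nc < m and arr[nr][nc] == 0:
--                 arr[nr][nc] = 2
--                 spread(arr, nr, nc)
--
--     best = 0
--     for w in itertools.combinations(zeros, 3):
--         arr = [row[:] for row in grid]
--         for r, c in w:
--             arr[r][c] = 1
--         for r, c in twos:
--             spread(arr, r, c)
--         best = max(best, sum(1 for r, c in zeros if arr[r][c] == 0))
--     return best
-- ===== Notes on version B (the rewrite author's own statement) =====
-- stated objective: alternative
-- what changed: The deque-based BFS flood is replaced by a recursive DFS flood fill (the worklist becomes the call stack), walls are placed by a loop over the chosen triple, and survivors are counted by iterating the precomputed zeros list instead of rescanning the whole grid.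
import Mathlib
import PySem

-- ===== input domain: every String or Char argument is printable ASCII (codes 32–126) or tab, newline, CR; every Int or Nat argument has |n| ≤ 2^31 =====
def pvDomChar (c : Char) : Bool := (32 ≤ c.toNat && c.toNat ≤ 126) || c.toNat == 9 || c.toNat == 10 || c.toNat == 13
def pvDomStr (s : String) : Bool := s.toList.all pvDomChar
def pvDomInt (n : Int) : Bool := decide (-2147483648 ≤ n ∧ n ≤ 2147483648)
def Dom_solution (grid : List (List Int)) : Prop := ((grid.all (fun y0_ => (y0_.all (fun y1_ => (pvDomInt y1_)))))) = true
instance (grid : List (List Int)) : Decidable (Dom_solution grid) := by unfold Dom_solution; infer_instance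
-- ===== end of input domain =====

-- B replaces A's deque-based BFS flood with a recursive DFS flood fill and counts
-- survivors over the precomputed zeros list instead of rescanning the grid (objective: alternative).

-- ===== shared low-level helpers (Python grid indexing / assignment / itertools.combinations) =====

/-- `a[r][c]` read with an out-of-range default `-1` (never hit on admitted inputs:
both Pythons only read cells after a `0 <= r < n and 0 <= c < m` check, or inside the
initial scan which `Pre_solution` keeps in range). Exact there. -/
def cellv (a : List (List Int)) (r c : Int) : Int :=
  if 0 ≤ r ∧ 0 ≤ c then (a.getD r.toNat []).getD c.toNat (-1) else -1

/-- `a[r][c] = v` (in-place in Python; functional here). Out-of-range is a no-op,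
never hit on admitted inputs. -/
def setCell (a : List (List Int)) (r c v : Int) : List (List Int) :=
  if 0 ≤ r ∧ 0 ≤ c then a.modify r.toNat (fun row => row.set c.toNat v) else a

/-- number of cells equal to 0 (used only as fuel for the loops). -/
def zcount (a : List (List Int)) : Nat :=
  (a.map (fun row => row.countP (fun x => decide (x = 0)))).sum

/-- the four (dr, dc) direction pairs of A (and B). -/
def dirs4 : List (Int × Int) := [(-1, 0), (0, -1), (1, 0), (0, 1)]

/-- itertools.combinations(l, 2) -/
def combos2 {α : Type} : List α → List (α × α)
  | [] => []
  | x :: xs => (xs.map (fun y => (x, y))) ++ combos2 xs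

/-- itertools.combinations(l, 3) -/
def combos3 {α : Type} : List α → List (α × α × α)
  | [] => []
  | x :: xs => ((combos2 xs).map (fun p => (x, p.1, p.2))) ++ combos3 xs

-- ===== PORT A =====

/-- A's scan collecting `zeros` and `twos` in one nested loop. -/
def scanA (g : List (List Int)) (is js : List Int) :
    List (Int × Int) × List (Int × Int) :=
  is.foldl (fun zt i =>
    js.foldl (fun (zt : List (Int × Int) × List (Int × Int)) j =>
      let zt1 := if cellv g i j = 0 then (zt.1 ++ [(i, j)], zt.2) else zt
      if cellv g i j = 2 then (zt1.1, zt1.2 ++ [(i, j)]) else zt1) zt)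
    (([], []) : List (Int × Int) × List (Int × Int))

/-- A's three wall assignments on the copied grid. -/
def wallsA (g : List (List Int)) (w : (Int × Int) × (Int × Int) × (Int × Int)) :
    List (List Int) :=
  setCell (setCell (setCell g w.1.1 w.1.2 1) w.2.1.1 w.2.1.2 1) w.2.2.1 w.2.2.2 1

/-- A's while-queue BFS (deque: popleft from the front, append at the back);
`fuel` only makes the loop structurally total, it is never exhausted at the
value `solution` supplies. -/
def bfsRun (n m : Int) : Nat → List (List Int) → List (Int × Int) → List (List Int)
  | 0, a, _ => a
  | fuel + 1, a, q =>
    match q with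
    | [] => a
    | (r, c) :: rest =>
      let st := dirs4.foldl
        (fun (st : List (List Int) × List (Int × Int)) d =>
          if 0 ≤ r + d.1 ∧ r + d.1 < n ∧ 0 ≤ c + d.2 ∧ c + d.2 < m ∧
              cellv st.1 (r + d.1) (c + d.2) = 0 then
            (setCell st.1 (r + d.1) (c + d.2) 2, st.2 ++ [(r + d.1, c + d.2)])
          else st)
        (a, rest)
      bfsRun n m fuel st.1 st.2

/-- A's final nested counting loop over the whole grid. -/
def countA (f : List (List Int)) (is js : List Int) : Int :=
  is.foldl (fun cnt r =>
    js.foldl (fun (cnt : Int) c => if cellv f r c = 0 then cnt + 1 else cnt) cnt) 0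

def solution (grid : List (List Int)) : Int :=
  let n : Int := (grid.length : Int)
  let m : Int := ((grid.headD []).length : Int)
  let zt := scanA grid (PySem.List.pyRange 0 n 1) (PySem.List.pyRange 0 m 1)
  (combos3 zt.1).foldl (fun mx w =>
    max mx (countA
      (bfsRun n m (5 * zcount (wallsA grid w) + zt.2.length + 1) (wallsA grid w) zt.2)
      (PySem.List.pyRange 0 n 1) (PySem.List.pyRange 0 m 1))) 0

-- ===== PORT B =====

/-- B's `zeros` comprehension. -/
def zerosB (g : List (List Int)) (is js : List Int) : List (Int × Int) :=
  is.flatMap (fun i =>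
    (js.filter (fun j => decide (cellv g i j = 0))).map (fun j => (i, j)))

/-- B's `twos` comprehension. -/
def twosB (g : List (List Int)) (is js : List Int) : List (Int × Int) :=
  is.flatMap (fun i =>
    (js.filter (fun j => decide (cellv g i j = 2))).map (fun j => (i, j)))

/-- B's recursive DFS flood fill `spread`; `fuel` only makes the recursion
structurally total (`zcount a + 1` always suffices, the call never exhausts it). -/
def spreadF (n m : Int) : Nat → List (List Int) → Int → Int → List (List Int)
  | 0, a, _, _ => a
  | fuel + 1, a, r, c =>
    dirs4.foldl (fun a' d =>
      if 0 ≤ r + d.1 ∧ r + d.1 < n ∧ 0 ≤ c + d.2 ∧ c + d.2 < m ∧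
          cellv a' (r + d.1) (c + d.2) = 0 then
        spreadF n m fuel (setCell a' (r + d.1) (c + d.2) 2) (r + d.1) (c + d.2)
      else a') a

/-- B's seed loop: `for r, c in twos: spread(arr, r, c)`. -/
def dfsAll (n m : Int) (twos : List (Int × Int)) (a0 : List (List Int)) :
    List (List Int) :=
  twos.foldl (fun a p => spreadF n m (zcount a + 1) a p.1 p.2) a0

/-- B's survivor count over the precomputed `zeros` list. -/
def countB (f : List (List Int)) (zs : List (Int × Int)) : Int :=
  zs.foldl (fun (s : Int) p => if cellv f p.1 p.2 = 0 then s + 1 else s) 0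

def solution_alt (grid : List (List Int)) : Int :=
  let n : Int := (grid.length : Int)
  let m : Int := ((grid.headD []).length : Int)
  let zeros := zerosB grid (PySem.List.pyRange 0 n 1) (PySem.List.pyRange 0 m 1)
  let twos := twosB grid (PySem.List.pyRange 0 n 1) (PySem.List.pyRange 0 m 1)
  (combos3 zeros).foldl (fun best w =>
    max best (countB
      (dfsAll n m twos
        ([w.1, w.2.1, w.2.2].foldl (fun a p => setCell a p.1 p.2 1) grid))
      zeros)) 0

-- ===== PRECONDITION & SPEC =====

-- Pre_ excludes exactly the inputs where Python A raises IndexError: the empty grid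
-- (grid[0]) and grids with some row shorter than the first row (the initial scan
-- indexes every row at columns 0..len(grid[0])-1).
def Pre_solution (grid : List (List Int)) : Prop :=
  grid ≠ [] ∧ ∀ row ∈ grid, (grid.headD []).length ≤ row.length

instance (grid : List (List Int)) : Decidable (Pre_solution grid) := by
  unfold Pre_solution; infer_instance

def pvWitness_solution : List (List Int) := [[2, 0], [0, 0]]

def Spec_solution (grid : List (List Int)) (out : Int) : Prop := out = solution_alt grid
instance (grid : List (List Int)) (out : Int) : Decidable (Spec_solution grid out) := by
  unfold Spec_solution; infer_instance

-- ===== CLAIM (what is proved, stated in full; the proofs are below) =====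
def Claim_equal_solution : Prop :=
  ∀ (grid : List (List Int)), Dom_solution grid → Pre_solution grid →
    Spec_solution grid (solution grid)

-- ===== LEMMAS AND PROOFS =====


-- ---- low-level facts about cellv / setCell / zcount ----

lemma cellv_zero_parts {a : List (List Int)} {r c : Int} (h : cellv a r c = 0) :
    0 ≤ r ∧ 0 ≤ c ∧ ∃ row, a[r.toNat]? = some row ∧ row[c.toNat]? = some 0 := by
  unfold cellv at h
  split at h
  · rename_i hrc
    refine ⟨hrc.1, hrc.2, ?_⟩
    simp only [List.getD_eq_getElem?_getD] at h
    cases hrow : a[r.toNat]? with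
    | none => rw [hrow] at h; simp at h
    | some row =>
      rw [hrow] at h
      simp only [Option.getD_some] at h
      cases hcell : row[c.toNat]? with
      | none => rw [hcell] at h; simp at h
      | some v =>
        rw [hcell] at h
        simp only [Option.getD_some] at h
        exact ⟨row, rfl, by rw [hcell, h]⟩
  · simp at h

lemma cellv_setCell_ne {a : List (List Int)} {r c v r' c' : Int}
    (h : ¬(r = r' ∧ c = c')) :
    cellv (setCell a r c v) r' c' = cellv a r' c' := by
  unfold cellv setCell
  by_cases hP : 0 ≤ r ∧ 0 ≤ c
  · rw [if_pos hP]
    by_cases hP' : 0 ≤ r' ∧ 0 ≤ c'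
    · rw [if_pos hP', if_pos hP']
      simp only [List.getD_eq_getElem?_getD, List.getElem?_modify]
      by_cases hr : r.toNat = r'.toNat
      · have hre : r = r' := by omega
        have hce : c ≠ c' := fun hc => h ⟨hre, hc⟩
        have hcn : c.toNat ≠ c'.toNat := by omega
        cases hrow : a[r'.toNat]? with
        | none => simp [hr]
        | some row => simp [hr, hcn]
      · cases hrow : a[r'.toNat]? <;> simp [hr]
    · rw [if_neg hP', if_neg hP']
  · rw [if_neg hP]

lemma cellv_setCell_self {a : List (List Int)} {r c : Int} (v : Int)
    (h : cellv a r c = 0) :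
    cellv (setCell a r c v) r c = v := by
  obtain ⟨hr, hc, row, hrow, hcell⟩ := cellv_zero_parts h
  have hlen : c.toNat < row.length := (List.getElem?_eq_some_iff.mp hcell).1
  unfold cellv setCell
  rw [if_pos ⟨hr, hc⟩, if_pos ⟨hr, hc⟩]
  simp [List.getD_eq_getElem?_getD, hrow, hlen]

lemma cellv_setCell_cases (a : List (List Int)) (r c v r' c' : Int) :
    cellv (setCell a r c v) r' c' = v ∨ cellv (setCell a r c v) r' c' = cellv a r' c' := by
  by_cases h : r = r' ∧ c = c'
  · obtain ⟨rfl, rfl⟩ := h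
    unfold cellv setCell
    by_cases hP : 0 ≤ r ∧ 0 ≤ c
    · rw [if_pos hP, if_pos hP, if_pos hP]
      simp only [List.getD_eq_getElem?_getD, List.getElem?_modify]
      cases hrow : a[r.toNat]? with
      | none => right; simp
      | some row =>
        by_cases hlen : c.toNat < row.length
        · left; simp [hlen]
        · right
          have h1 : (row.set c.toNat v)[c.toNat]? = none :=
            List.getElem?_eq_none (by simpa using by omega)
          have h2 : row[c.toNat]? = none := List.getElem?_eq_none (by omega)
          simp [h1, h2]
    · right; simp [hP]
  · right; exact cellv_setCell_ne h

lemma countP_set_zero {row : List Int} {j : Nat} (h : row[j]? = some 0) :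
    (row.set j (2 : Int)).countP (fun x => decide (x = 0)) + 1
      = row.countP (fun x => decide (x = 0)) := by
  induction row generalizing j with
  | nil => simp at h
  | cons x t ih =>
    cases j with
    | zero =>
      simp only [List.getElem?_cons_zero, Option.some_inj] at h
      subst h
      simp
    | succ j =>
      simp only [List.getElem?_cons_succ] at h
      have := ih h
      show ((x :: t.set j 2).countP _) + 1 = _
      simp only [List.countP_cons]
      omega

lemma zcount_setCell {a : List (List Int)} {r c : Int} (h : cellv a r c = 0) :
    zcount (setCell a r c 2) + 1 = zcount a := by
  obtain ⟨hr, hc, row, hrow, hcell⟩ := cellv_zero_parts h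
  unfold setCell
  rw [if_pos ⟨hr, hc⟩]
  have key : ∀ (l : List (List Int)) (i : Nat), l[i]? = some row →
      zcount (l.modify i (fun rw => rw.set c.toNat 2)) + 1 = zcount l := by
    intro l
    induction l with
    | nil => intro i hi; simp at hi
    | cons hd t ih =>
      intro i hi
      cases i with
      | zero =>
        simp only [List.getElem?_cons_zero, Option.some_inj] at hi
        subst hi
        show zcount (hd.set c.toNat 2 :: t) + 1 = zcount (hd :: t)
        unfold zcount
        simp only [List.map_cons, List.sum_cons]
        have := countP_set_zero hcell
        omega
      | succ i =>
        simp only [List.getElem?_cons_succ] at hi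
        show zcount (hd :: t.modify i _) + 1 = zcount (hd :: t)
        unfold zcount
        simp only [List.map_cons, List.sum_cons]
        have := ih i hi
        unfold zcount at this
        omega
  exact key a r.toNat hrow

-- ---- the reachability relation both floods compute ----

/-- the four neighbours of a cell. -/
def nbrs (p : Int × Int) : List (Int × Int) :=
  dirs4.map (fun d => (p.1 + d.1, p.2 + d.2))

/-- in-bounds for the n×m board. -/
def InB (n m : Int) (p : Int × Int) : Prop :=
  0 ≤ p.1 ∧ p.1 < n ∧ 0 ≤ p.2 ∧ p.2 < m

/-- cells infected by the flood: 0-cells of `A0` joined to a seed by a chain of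
in-bounds 0-cells. -/
inductive Reach (A0 : List (List Int)) (n m : Int) (seeds : List (Int × Int)) :
    (Int × Int) → Prop
  | base {s p} (hs : s ∈ seeds) (hn : p ∈ nbrs s) (hb : InB n m p)
      (h0 : cellv A0 p.1 p.2 = 0) : Reach A0 n m seeds p
  | step {b p} (hr : Reach A0 n m seeds b) (hn : p ∈ nbrs b) (hb : InB n m p)
      (h0 : cellv A0 p.1 p.2 = 0) : Reach A0 n m seeds p

/-- `b` extends `a` by turning some 0-cells into 2. -/
def GExt (a b : List (List Int)) : Prop :=
  ∀ r c : Int, cellv b r c = cellv a r c ∨ (cellv a r c = 0 ∧ cellv b r c = 2)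

/-- `a` is `A0` with some reachable 0-cells turned into 2. -/
def Good (A0 : List (List Int)) (n m : Int) (seeds : List (Int × Int))
    (a : List (List Int)) : Prop :=
  ∀ r c : Int, cellv a r c = cellv A0 r c ∨
    (cellv A0 r c = 0 ∧ cellv a r c = 2 ∧ Reach A0 n m seeds (r, c))

def Changed (x y : List (List Int)) (p : Int × Int) : Prop :=
  cellv y p.1 p.2 ≠ cellv x p.1 p.2

/-- no neighbour of `p` is still 0. -/
def ClosedAt (n m : Int) (a : List (List Int)) (p : Int × Int) : Prop :=
  ∀ q ∈ nbrs p, InB n m q → cellv a q.1 q.2 ≠ 0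

lemma gext_refl (a : List (List Int)) : GExt a a := fun _ _ => Or.inl rfl

lemma gext_trans {a b c : List (List Int)} (h1 : GExt a b) (h2 : GExt b c) : GExt a c := by
  intro r cc
  rcases h2 r cc with h | h
  · rw [h]; exact h1 r cc
  · rcases h1 r cc with h' | h'
    · exact Or.inr ⟨h'.symm ▸ h.1, h.2⟩
    · exact Or.inr ⟨h'.1, h.2⟩

lemma ext_setCell {a : List (List Int)} {r c : Int} (h : cellv a r c = 0) :
    GExt a (setCell a r c 2) := by
  intro r' c'
  by_cases he : r = r' ∧ c = c'
  · obtain ⟨rfl, rfl⟩ := he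
    exact Or.inr ⟨h, cellv_setCell_self 2 h⟩
  · exact Or.inl (cellv_setCell_ne he)

lemma ext_ne_zero {a b : List (List Int)} {r c : Int} (he : GExt a b)
    (h : cellv a r c ≠ 0) : cellv b r c ≠ 0 := by
  rcases he r c with h' | h'
  · rw [h']; exact h
  · exact absurd h'.1 h

lemma closedAt_mono {n m : Int} {a b : List (List Int)} {p : Int × Int}
    (he : GExt a b) (h : ClosedAt n m a p) : ClosedAt n m b p :=
  fun q hq hb => ext_ne_zero he (h q hq hb)

lemma good_zero {A0 a : List (List Int)} {n m : Int} {seeds : List (Int × Int)}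
    {r c : Int} (hG : Good A0 n m seeds a) (h : cellv a r c = 0) :
    cellv A0 r c = 0 := by
  rcases hG r c with h' | h'
  · rw [← h']; exact h
  · exact absurd h.symm (by rw [h'.2.1]; norm_num)

lemma good_setCell {A0 a : List (List Int)} {n m : Int} {seeds : List (Int × Int)}
    {r c : Int} (hG : Good A0 n m seeds a) (h : cellv a r c = 0)
    (hr : Reach A0 n m seeds (r, c)) : Good A0 n m seeds (setCell a r c 2) := by
  intro r' c'
  by_cases he : r = r' ∧ c = c'
  · obtain ⟨rfl, rfl⟩ := he
    exact Or.inr ⟨good_zero hG h, cellv_setCell_self 2 h, hr⟩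
  · rw [cellv_setCell_ne he]; exact hG r' c'

lemma good_changed {A0 a : List (List Int)} {n m : Int} {seeds : List (Int × Int)}
    {p : Int × Int} (hG : Good A0 n m seeds a) (h : Changed A0 a p) :
    cellv A0 p.1 p.2 = 0 ∧ cellv a p.1 p.2 = 2 ∧ Reach A0 n m seeds p := by
  rcases hG p.1 p.2 with h' | h'
  · exact absurd h' h
  · exact h'

lemma changed_mono {A0 a b : List (List Int)} {n m : Int} {seeds : List (Int × Int)}
    {p : Int × Int} (hG : Good A0 n m seeds a) (he : GExt a b)
    (h : Changed A0 a p) : Changed A0 b p := by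
  obtain ⟨h0, h2, _⟩ := good_changed hG h
  have : cellv b p.1 p.2 = 2 := by
    rcases he p.1 p.2 with h' | h'
    · rw [h', h2]
    · exact h'.2
  rw [Changed, this, h0]; norm_num

lemma mem_nbrs {p q : Int × Int} :
    q ∈ nbrs p ↔ ∃ d ∈ dirs4, q = (p.1 + d.1, p.2 + d.2) := by
  simp [nbrs, eq_comm]

-- ---- the DFS flood computes exactly the reachable marking ----

lemma spread_spec (A0 : List (List Int)) (n m : Int) (seeds : List (Int × Int)) :
    ∀ (fuel : Nat) (a : List (List Int)) (r c : Int),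
      Good A0 n m seeds a →
      ((r, c) ∈ seeds ∨ Reach A0 n m seeds (r, c)) →
      zcount a < fuel →
      Good A0 n m seeds (spreadF n m fuel a r c) ∧
      GExt a (spreadF n m fuel a r c) ∧
      zcount (spreadF n m fuel a r c) ≤ zcount a ∧
      (∀ p : Int × Int, (p = (r, c) ∨ Changed a (spreadF n m fuel a r c) p) →
        ClosedAt n m (spreadF n m fuel a r c) p) := by
  intro fuel
  induction fuel with
  | zero => intro a r c _ _ hf; exact absurd hf (Nat.not_lt_zero _)
  | succ f ih =>
    intro a r c hG hroot hf
    have hkey : ∀ (ds : List (Int × Int)), (∀ d ∈ ds, d ∈ dirs4) →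
        ∀ a', Good A0 n m seeds a' → GExt a a' → zcount a' ≤ zcount a →
          (∀ p : Int × Int, Changed a a' p → ClosedAt n m a' p) →
          Good A0 n m seeds (ds.foldl (fun a' d =>
              if 0 ≤ r + d.1 ∧ r + d.1 < n ∧ 0 ≤ c + d.2 ∧ c + d.2 < m ∧
                  cellv a' (r + d.1) (c + d.2) = 0 then
                spreadF n m f (setCell a' (r + d.1) (c + d.2) 2) (r + d.1) (c + d.2)
              else a') a') ∧
          GExt a' (ds.foldl (fun a' d =>
              if 0 ≤ r + d.1 ∧ r + d.1 < n ∧ 0 ≤ c + d.2 ∧ c + d.2 < m ∧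
                  cellv a' (r + d.1) (c + d.2) = 0 then
                spreadF n m f (setCell a' (r + d.1) (c + d.2) 2) (r + d.1) (c + d.2)
              else a') a') ∧
          zcount (ds.foldl (fun a' d =>
              if 0 ≤ r + d.1 ∧ r + d.1 < n ∧ 0 ≤ c + d.2 ∧ c + d.2 < m ∧
                  cellv a' (r + d.1) (c + d.2) = 0 then
                spreadF n m f (setCell a' (r + d.1) (c + d.2) 2) (r + d.1) (c + d.2)
              else a') a') ≤ zcount a' ∧
          (∀ p : Int × Int, Changed a (ds.foldl (fun a' d =>
              if 0 ≤ r + d.1 ∧ r + d.1 < n ∧ 0 ≤ c + d.2 ∧ c + d.2 < m ∧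
                  cellv a' (r + d.1) (c + d.2) = 0 then
                spreadF n m f (setCell a' (r + d.1) (c + d.2) 2) (r + d.1) (c + d.2)
              else a') a') p → ClosedAt n m (ds.foldl (fun a' d =>
              if 0 ≤ r + d.1 ∧ r + d.1 < n ∧ 0 ≤ c + d.2 ∧ c + d.2 < m ∧
                  cellv a' (r + d.1) (c + d.2) = 0 then
                spreadF n m f (setCell a' (r + d.1) (c + d.2) 2) (r + d.1) (c + d.2)
              else a') a') p) ∧
          (∀ d ∈ ds, InB n m (r + d.1, c + d.2) → cellv (ds.foldl (fun a' d =>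
              if 0 ≤ r + d.1 ∧ r + d.1 < n ∧ 0 ≤ c + d.2 ∧ c + d.2 < m ∧
                  cellv a' (r + d.1) (c + d.2) = 0 then
                spreadF n m f (setCell a' (r + d.1) (c + d.2) 2) (r + d.1) (c + d.2)
              else a') a') (r + d.1) (c + d.2) ≠ 0) := by
      intro ds
      induction ds with
      | nil =>
        intro _ a' hG' hExt hz hH
        exact ⟨hG', gext_refl _, le_refl _, fun p hp => hH p hp, by simp⟩
      | cons d ds' ihds =>
        intro hds a' hG' hExt hz hH
        simp only [List.foldl_cons]
        by_cases hg : 0 ≤ r + d.1 ∧ r + d.1 < n ∧ 0 ≤ c + d.2 ∧ c + d.2 < m ∧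
            cellv a' (r + d.1) (c + d.2) = 0
        · rw [if_pos hg]
          have h0 : cellv a' (r + d.1) (c + d.2) = 0 := hg.2.2.2.2
          have hInB : InB n m (r + d.1, c + d.2) := ⟨hg.1, hg.2.1, hg.2.2.1, hg.2.2.2.1⟩
          have hA00 : cellv A0 (r + d.1) (c + d.2) = 0 := good_zero hG' h0
          have hnd_nbr : (r + d.1, c + d.2) ∈ nbrs (r, c) :=
            mem_nbrs.2 ⟨d, hds d List.mem_cons_self, rfl⟩
          have hReach : Reach A0 n m seeds (r + d.1, c + d.2) := by
            rcases hroot with hs | hr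
            · exact Reach.base hs hnd_nbr hInB hA00
            · exact Reach.step hr hnd_nbr hInB hA00
          have hG1 : Good A0 n m seeds (setCell a' (r + d.1) (c + d.2) 2) :=
            good_setCell hG' h0 hReach
          have hE1 : GExt a' (setCell a' (r + d.1) (c + d.2) 2) := ext_setCell h0
          have hzeq : zcount (setCell a' (r + d.1) (c + d.2) 2) + 1 = zcount a' :=
            zcount_setCell h0
          have hlt : zcount (setCell a' (r + d.1) (c + d.2) 2) < f := by omega
          obtain ⟨hG2, hE2, hz2, hC2⟩ :=
            ih (setCell a' (r + d.1) (c + d.2) 2) (r + d.1) (c + d.2) hG1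
              (Or.inr hReach) hlt
          have hH2 : ∀ p : Int × Int,
              Changed a (spreadF n m f (setCell a' (r + d.1) (c + d.2) 2)
                (r + d.1) (c + d.2)) p →
              ClosedAt n m (spreadF n m f (setCell a' (r + d.1) (c + d.2) 2)
                (r + d.1) (c + d.2)) p := by
            intro p hp
            by_cases h21 : Changed (setCell a' (r + d.1) (c + d.2) 2)
                (spreadF n m f (setCell a' (r + d.1) (c + d.2) 2) (r + d.1) (c + d.2)) p
            · exact hC2 p (Or.inr h21)
            · have he21 : cellv (spreadF n m f (setCell a' (r + d.1) (c + d.2) 2)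
                  (r + d.1) (c + d.2)) p.1 p.2
                  = cellv (setCell a' (r + d.1) (c + d.2) 2) p.1 p.2 := by
                by_contra hne; exact h21 hne
              by_cases hpd : p = (r + d.1, c + d.2)
              · exact hC2 p (Or.inl hpd)
              · have he10 : cellv (setCell a' (r + d.1) (c + d.2) 2) p.1 p.2
                    = cellv a' p.1 p.2 := by
                  refine cellv_setCell_ne ?_
                  intro hc
                  exact hpd (by cases p with | mk x y =>
                    simp only at hc; simp [hc.1.symm, hc.2.symm])
                have hch' : Changed a a' p := by
                  rw [Changed] at hp ⊢
                  rw [he21, he10] at hp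
                  exact hp
                exact closedAt_mono (gext_trans hE1 hE2) (hH p hch')
          obtain ⟨hG3, hE3, hz3, hH3, hD3⟩ :=
            ihds (fun d' hd' => hds d' (List.mem_cons_of_mem _ hd'))
              (spreadF n m f (setCell a' (r + d.1) (c + d.2) 2) (r + d.1) (c + d.2))
              hG2 (gext_trans hExt (gext_trans hE1 hE2)) (by omega) hH2
          refine ⟨hG3, gext_trans (gext_trans hE1 hE2) hE3, by omega, hH3, ?_⟩
          intro d' hd' hb
          rcases List.mem_cons.mp hd' with rfl | hd'
          · have h2 : cellv (setCell a' (r + d'.1) (c + d'.2) 2) (r + d'.1) (c + d'.2)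
                = 2 := cellv_setCell_self 2 h0
            have hne2 : cellv (spreadF n m f (setCell a' (r + d'.1) (c + d'.2) 2)
                (r + d'.1) (c + d'.2)) (r + d'.1) (c + d'.2) ≠ 0 :=
              ext_ne_zero hE2 (by rw [h2]; norm_num)
            exact ext_ne_zero hE3 hne2
          · exact hD3 d' hd' hb
        · rw [if_neg hg]
          obtain ⟨hG3, hE3, hz3, hH3, hD3⟩ :=
            ihds (fun d' hd' => hds d' (List.mem_cons_of_mem _ hd')) a' hG' hExt hz hH
          refine ⟨hG3, hE3, hz3, hH3, ?_⟩
          intro d' hd' hb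
          rcases List.mem_cons.mp hd' with rfl | hd'
          · have hne : cellv a' (r + d'.1) (c + d'.2) ≠ 0 := by
              intro h0
              exact hg ⟨hb.1, hb.2.1, hb.2.2.1, hb.2.2.2, h0⟩
            exact ext_ne_zero hE3 hne
          · exact hD3 d' hd' hb
    obtain ⟨hG', hE', hz', hH', hD'⟩ :=
      hkey dirs4 (fun d hd => hd) a hG (gext_refl a) (le_refl _)
        (fun p hp => absurd rfl hp)
    refine ⟨hG', hE', hz', ?_⟩
    intro p hp
    rcases hp with rfl | hch
    · intro q hq hbq
      obtain ⟨d, hd, rfl⟩ := mem_nbrs.1 hq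
      simpa using hD' d hd (by simpa using hbq)
    · exact hH' p hch

-- ---- the BFS flood computes exactly the reachable marking ----

lemma bfs_spec (A0 : List (List Int)) (n m : Int) (seeds : List (Int × Int)) :
    ∀ (fuel : Nat) (a : List (List Int)) (q : List (Int × Int)),
      Good A0 n m seeds a →
      (∀ p ∈ q, p ∈ seeds ∨ Changed A0 a p) →
      (∀ p : Int × Int, (p ∈ seeds ∨ Changed A0 a p) → p ∉ q → ClosedAt n m a p) →
      5 * zcount a + q.length < fuel →
      Good A0 n m seeds (bfsRun n m fuel a q) ∧
      (∀ p : Int × Int, (p ∈ seeds ∨ Changed A0 (bfsRun n m fuel a q) p) →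
        ClosedAt n m (bfsRun n m fuel a q) p) := by
  intro fuel
  induction fuel with
  | zero => intro a q _ _ _ hf; exact absurd hf (Nat.not_lt_zero _)
  | succ f ih =>
    intro a q hG hQ hC hf
    match q with
    | [] =>
      exact ⟨hG, fun p hp => hC p hp List.not_mem_nil⟩
    | (r, c) :: rest =>
      have hroot : (r, c) ∈ seeds ∨ Reach A0 n m seeds (r, c) := by
        rcases hQ (r, c) List.mem_cons_self with hs | hch
        · exact Or.inl hs
        · exact Or.inr (good_changed hG hch).2.2
      have hkey : ∀ (ds : List (Int × Int)), (∀ d ∈ ds, d ∈ dirs4) →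
          ∀ (st : List (List Int) × List (Int × Int)),
            Good A0 n m seeds st.1 →
            (∀ p ∈ st.2, p ∈ seeds ∨ Changed A0 st.1 p) →
            (∀ p : Int × Int, (p ∈ seeds ∨ Changed A0 st.1 p) → p ∉ st.2 →
              p ≠ (r, c) → ClosedAt n m st.1 p) →
            Good A0 n m seeds (ds.foldl (fun (st : List (List Int) × List (Int × Int)) d =>
                if 0 ≤ r + d.1 ∧ r + d.1 < n ∧ 0 ≤ c + d.2 ∧ c + d.2 < m ∧
                    cellv st.1 (r + d.1) (c + d.2) = 0 then
                  (setCell st.1 (r + d.1) (c + d.2) 2, st.2 ++ [(r + d.1, c + d.2)])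
                else st) st).1 ∧
            (∀ p ∈ (ds.foldl (fun (st : List (List Int) × List (Int × Int)) d =>
                if 0 ≤ r + d.1 ∧ r + d.1 < n ∧ 0 ≤ c + d.2 ∧ c + d.2 < m ∧
                    cellv st.1 (r + d.1) (c + d.2) = 0 then
                  (setCell st.1 (r + d.1) (c + d.2) 2, st.2 ++ [(r + d.1, c + d.2)])
                else st) st).2, p ∈ seeds ∨
              Changed A0 (ds.foldl (fun (st : List (List Int) × List (Int × Int)) d =>
                if 0 ≤ r + d.1 ∧ r + d.1 < n ∧ 0 ≤ c + d.2 ∧ c + d.2 < m ∧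
                    cellv st.1 (r + d.1) (c + d.2) = 0 then
                  (setCell st.1 (r + d.1) (c + d.2) 2, st.2 ++ [(r + d.1, c + d.2)])
                else st) st).1 p) ∧
            (∀ p : Int × Int, (p ∈ seeds ∨
                Changed A0 (ds.foldl (fun (st : List (List Int) × List (Int × Int)) d =>
                  if 0 ≤ r + d.1 ∧ r + d.1 < n ∧ 0 ≤ c + d.2 ∧ c + d.2 < m ∧
                      cellv st.1 (r + d.1) (c + d.2) = 0 then
                    (setCell st.1 (r + d.1) (c + d.2) 2, st.2 ++ [(r + d.1, c + d.2)])
                  else st) st).1 p) →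
              p ∉ (ds.foldl (fun (st : List (List Int) × List (Int × Int)) d =>
                  if 0 ≤ r + d.1 ∧ r + d.1 < n ∧ 0 ≤ c + d.2 ∧ c + d.2 < m ∧
                      cellv st.1 (r + d.1) (c + d.2) = 0 then
                    (setCell st.1 (r + d.1) (c + d.2) 2, st.2 ++ [(r + d.1, c + d.2)])
                  else st) st).2 →
              p ≠ (r, c) →
              ClosedAt n m (ds.foldl (fun (st : List (List Int) × List (Int × Int)) d =>
                  if 0 ≤ r + d.1 ∧ r + d.1 < n ∧ 0 ≤ c + d.2 ∧ c + d.2 < m ∧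
                      cellv st.1 (r + d.1) (c + d.2) = 0 then
                    (setCell st.1 (r + d.1) (c + d.2) 2, st.2 ++ [(r + d.1, c + d.2)])
                  else st) st).1 p) ∧
            GExt st.1 (ds.foldl (fun (st : List (List Int) × List (Int × Int)) d =>
                if 0 ≤ r + d.1 ∧ r + d.1 < n ∧ 0 ≤ c + d.2 ∧ c + d.2 < m ∧
                    cellv st.1 (r + d.1) (c + d.2) = 0 then
                  (setCell st.1 (r + d.1) (c + d.2) 2, st.2 ++ [(r + d.1, c + d.2)])
                else st) st).1 ∧
            (5 * zcount (ds.foldl (fun (st : List (List Int) × List (Int × Int)) d =>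
                if 0 ≤ r + d.1 ∧ r + d.1 < n ∧ 0 ≤ c + d.2 ∧ c + d.2 < m ∧
                    cellv st.1 (r + d.1) (c + d.2) = 0 then
                  (setCell st.1 (r + d.1) (c + d.2) 2, st.2 ++ [(r + d.1, c + d.2)])
                else st) st).1 +
              (ds.foldl (fun (st : List (List Int) × List (Int × Int)) d =>
                if 0 ≤ r + d.1 ∧ r + d.1 < n ∧ 0 ≤ c + d.2 ∧ c + d.2 < m ∧
                    cellv st.1 (r + d.1) (c + d.2) = 0 then
                  (setCell st.1 (r + d.1) (c + d.2) 2, st.2 ++ [(r + d.1, c + d.2)])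
                else st) st).2.length ≤ 5 * zcount st.1 + st.2.length) ∧
            (∀ d ∈ ds, InB n m (r + d.1, c + d.2) →
              cellv (ds.foldl (fun (st : List (List Int) × List (Int × Int)) d =>
                if 0 ≤ r + d.1 ∧ r + d.1 < n ∧ 0 ≤ c + d.2 ∧ c + d.2 < m ∧
                    cellv st.1 (r + d.1) (c + d.2) = 0 then
                  (setCell st.1 (r + d.1) (c + d.2) 2, st.2 ++ [(r + d.1, c + d.2)])
                else st) st).1 (r + d.1) (c + d.2) ≠ 0) := by
        intro ds
        induction ds with
        | nil =>
          intro _ st hG' hQ' hC'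
          exact ⟨hG', hQ', hC', gext_refl _, le_refl _, by simp⟩
        | cons d ds' ihds =>
          intro hds st hG' hQ' hC'
          simp only [List.foldl_cons]
          by_cases hg : 0 ≤ r + d.1 ∧ r + d.1 < n ∧ 0 ≤ c + d.2 ∧ c + d.2 < m ∧
              cellv st.1 (r + d.1) (c + d.2) = 0
          · rw [if_pos hg]
            have h0 : cellv st.1 (r + d.1) (c + d.2) = 0 := hg.2.2.2.2
            have hInB : InB n m (r + d.1, c + d.2) := ⟨hg.1, hg.2.1, hg.2.2.1, hg.2.2.2.1⟩
            have hA00 : cellv A0 (r + d.1) (c + d.2) = 0 := good_zero hG' h0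
            have hnd_nbr : (r + d.1, c + d.2) ∈ nbrs (r, c) :=
              mem_nbrs.2 ⟨d, hds d List.mem_cons_self, rfl⟩
            have hReach : Reach A0 n m seeds (r + d.1, c + d.2) := by
              rcases hroot with hs | hr
              · exact Reach.base hs hnd_nbr hInB hA00
              · exact Reach.step hr hnd_nbr hInB hA00
            have hG1 : Good A0 n m seeds (setCell st.1 (r + d.1) (c + d.2) 2) :=
              good_setCell hG' h0 hReach
            have hE1 : GExt st.1 (setCell st.1 (r + d.1) (c + d.2) 2) := ext_setCell h0
            have hzeq : zcount (setCell st.1 (r + d.1) (c + d.2) 2) + 1 = zcount st.1 :=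
              zcount_setCell h0
            have h2v : cellv (setCell st.1 (r + d.1) (c + d.2) 2) (r + d.1) (c + d.2) = 2 :=
              cellv_setCell_self 2 h0
            have hQ1 : ∀ p ∈ st.2 ++ [(r + d.1, c + d.2)],
                p ∈ seeds ∨ Changed A0 (setCell st.1 (r + d.1) (c + d.2) 2) p := by
              intro p hp
              rcases List.mem_append.mp hp with hp | hp
              · rcases hQ' p hp with hs | hch
                · exact Or.inl hs
                · exact Or.inr (changed_mono hG' hE1 hch)
              · have : p = (r + d.1, c + d.2) := by simpa using hp
                subst this
                exact Or.inr (by rw [Changed, h2v, hA00]; norm_num)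
            have hC1 : ∀ p : Int × Int,
                (p ∈ seeds ∨ Changed A0 (setCell st.1 (r + d.1) (c + d.2) 2) p) →
                p ∉ st.2 ++ [(r + d.1, c + d.2)] → p ≠ (r, c) →
                ClosedAt n m (setCell st.1 (r + d.1) (c + d.2) 2) p := by
              intro p hp hnq hnrc
              have hpnd : p ≠ (r + d.1, c + d.2) := by
                intro h; exact hnq (h ▸ List.mem_append_right _ (by simp))
              have hcell : cellv (setCell st.1 (r + d.1) (c + d.2) 2) p.1 p.2
                  = cellv st.1 p.1 p.2 := by
                refine cellv_setCell_ne ?_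
                intro hc
                exact hpnd (by cases p with | mk x y =>
                  simp only at hc; simp [hc.1.symm, hc.2.symm])
              have hp' : p ∈ seeds ∨ Changed A0 st.1 p := by
                rcases hp with hs | hch
                · exact Or.inl hs
                · exact Or.inr (by rwa [Changed, hcell] at hch)
              have hq' : p ∉ st.2 := fun h => hnq (List.mem_append_left _ h)
              exact closedAt_mono hE1 (hC' p hp' hq' hnrc)
            obtain ⟨hG3, hQ3, hC3, hE3, hz3, hD3⟩ :=
              ihds (fun d' hd' => hds d' (List.mem_cons_of_mem _ hd'))
                (setCell st.1 (r + d.1) (c + d.2) 2, st.2 ++ [(r + d.1, c + d.2)])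
                hG1 hQ1 hC1
            refine ⟨hG3, hQ3, hC3, gext_trans hE1 hE3, ?_, ?_⟩
            · simp only [List.length_append, List.length_singleton] at hz3 ⊢
              omega
            · intro d' hd' hb
              rcases List.mem_cons.mp hd' with rfl | hd'
              · exact ext_ne_zero hE3 (by rw [h2v]; norm_num)
              · exact hD3 d' hd' hb
          · rw [if_neg hg]
            obtain ⟨hG3, hQ3, hC3, hE3, hz3, hD3⟩ :=
              ihds (fun d' hd' => hds d' (List.mem_cons_of_mem _ hd')) st hG' hQ' hC'
            refine ⟨hG3, hQ3, hC3, hE3, hz3, ?_⟩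
            intro d' hd' hb
            rcases List.mem_cons.mp hd' with rfl | hd'
            · have hne : cellv st.1 (r + d'.1) (c + d'.2) ≠ 0 := by
                intro h0
                exact hg ⟨hb.1, hb.2.1, hb.2.2.1, hb.2.2.2, h0⟩
              exact ext_ne_zero hE3 hne
            · exact hD3 d' hd' hb
      obtain ⟨hG', hQ', hC', hE', hz', hD'⟩ :=
        hkey dirs4 (fun d hd => hd) (a, rest) hG
          (fun p hp => hQ p (List.mem_cons_of_mem _ hp))
          (fun p hp hq hrc => hC p hp (by
            intro hmem
            rcases List.mem_cons.mp hmem with h | h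
            · exact hrc h
            · exact hq h))
      have hCfull : ∀ p : Int × Int,
          (p ∈ seeds ∨ Changed A0 (dirs4.foldl (fun (st : List (List Int) × List (Int × Int)) d =>
              if 0 ≤ r + d.1 ∧ r + d.1 < n ∧ 0 ≤ c + d.2 ∧ c + d.2 < m ∧
                  cellv st.1 (r + d.1) (c + d.2) = 0 then
                (setCell st.1 (r + d.1) (c + d.2) 2, st.2 ++ [(r + d.1, c + d.2)])
              else st) (a, rest)).1 p) →
          p ∉ (dirs4.foldl (fun (st : List (List Int) × List (Int × Int)) d =>
              if 0 ≤ r + d.1 ∧ r + d.1 < n ∧ 0 ≤ c + d.2 ∧ c + d.2 < m ∧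
                  cellv st.1 (r + d.1) (c + d.2) = 0 then
                (setCell st.1 (r + d.1) (c + d.2) 2, st.2 ++ [(r + d.1, c + d.2)])
              else st) (a, rest)).2 →
          ClosedAt n m (dirs4.foldl (fun (st : List (List Int) × List (Int × Int)) d =>
              if 0 ≤ r + d.1 ∧ r + d.1 < n ∧ 0 ≤ c + d.2 ∧ c + d.2 < m ∧
                  cellv st.1 (r + d.1) (c + d.2) = 0 then
                (setCell st.1 (r + d.1) (c + d.2) 2, st.2 ++ [(r + d.1, c + d.2)])
              else st) (a, rest)).1 p := by
        intro p hp hq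
        by_cases hrc : p = (r, c)
        · subst hrc
          intro qq hqq hbq
          obtain ⟨d, hd, rfl⟩ := mem_nbrs.1 hqq
          simpa using hD' d hd (by simpa using hbq)
        · exact hC' p hp hq hrc
      have hdef : bfsRun n m (f + 1) a ((r, c) :: rest) =
          bfsRun n m f (dirs4.foldl (fun (st : List (List Int) × List (Int × Int)) d =>
              if 0 ≤ r + d.1 ∧ r + d.1 < n ∧ 0 ≤ c + d.2 ∧ c + d.2 < m ∧
                  cellv st.1 (r + d.1) (c + d.2) = 0 then
                (setCell st.1 (r + d.1) (c + d.2) 2, st.2 ++ [(r + d.1, c + d.2)])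
              else st) (a, rest)).1
            (dirs4.foldl (fun (st : List (List Int) × List (Int × Int)) d =>
              if 0 ≤ r + d.1 ∧ r + d.1 < n ∧ 0 ≤ c + d.2 ∧ c + d.2 < m ∧
                  cellv st.1 (r + d.1) (c + d.2) = 0 then
                (setCell st.1 (r + d.1) (c + d.2) 2, st.2 ++ [(r + d.1, c + d.2)])
              else st) (a, rest)).2 := rfl
      rw [hdef]
      refine ih _ _ hG' hQ' hCfull ?_
      simp only [List.length_cons] at hf
      have hz2 : 5 * zcount a + rest.length ≥
          5 * zcount (dirs4.foldl (fun (st : List (List Int) × List (Int × Int)) d =>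
              if 0 ≤ r + d.1 ∧ r + d.1 < n ∧ 0 ≤ c + d.2 ∧ c + d.2 < m ∧
                  cellv st.1 (r + d.1) (c + d.2) = 0 then
                (setCell st.1 (r + d.1) (c + d.2) 2, st.2 ++ [(r + d.1, c + d.2)])
              else st) (a, rest)).1 +
            (dirs4.foldl (fun (st : List (List Int) × List (Int × Int)) d =>
              if 0 ≤ r + d.1 ∧ r + d.1 < n ∧ 0 ≤ c + d.2 ∧ c + d.2 < m ∧
                  cellv st.1 (r + d.1) (c + d.2) = 0 then
                (setCell st.1 (r + d.1) (c + d.2) 2, st.2 ++ [(r + d.1, c + d.2)])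
              else st) (a, rest)).2.length := hz'
      omega

-- ---- a marked-and-closed grid is the reachable marking, pointwise ----

lemma final_char_reach {A0 F : List (List Int)} {n m : Int} {seeds : List (Int × Int)}
    (hG : Good A0 n m seeds F)
    (hC : ∀ p : Int × Int, (p ∈ seeds ∨ Changed A0 F p) → ClosedAt n m F p) :
    ∀ p : Int × Int, Reach A0 n m seeds p → cellv F p.1 p.2 = 2 := by
  intro p hp
  induction hp with
  | base hs hn hb h0 =>
    rename_i s p'
    have hne := hC s (Or.inl hs) p' hn hb
    rcases hG p'.1 p'.2 with h | h
    · exact absurd (h.trans h0) hne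
    · exact h.2.1
  | step hr hn hb h0 ih =>
    rename_i b p'
    have hb0 : cellv A0 b.1 b.2 = 0 := by
      clear ih hn hb h0
      induction hr with
      | base _ _ _ h0 => exact h0
      | step _ _ _ h0 => exact h0
    have hch : Changed A0 F b := by rw [Changed, ih, hb0]; norm_num
    have hne := hC b (Or.inr hch) p' hn hb
    rcases hG p'.1 p'.2 with h | h
    · exact absurd (h.trans h0) hne
    · exact h.2.1

lemma final_char_not {A0 F : List (List Int)} {n m : Int} {seeds : List (Int × Int)}
    (hG : Good A0 n m seeds F) {p : Int × Int} (hR : ¬ Reach A0 n m seeds p) :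
    cellv F p.1 p.2 = cellv A0 p.1 p.2 := by
  rcases hG p.1 p.2 with h | h
  · exact h
  · exact absurd h.2.2 hR


-- ---- the two scans build the same zeros/twos lists ----

lemma scanA_eq (g : List (List Int)) (is js : List Int) :
    scanA g is js = (zerosB g is js, twosB g is js) := by
  have hrow : ∀ (i : Int) (js' : List Int) (zt : List (Int × Int) × List (Int × Int)),
      js'.foldl (fun (zt : List (Int × Int) × List (Int × Int)) j =>
        let zt1 := if cellv g i j = 0 then (zt.1 ++ [(i, j)], zt.2) else zt
        if cellv g i j = 2 then (zt1.1, zt1.2 ++ [(i, j)]) else zt1) zt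
      = (zt.1 ++ (js'.filter (fun j => decide (cellv g i j = 0))).map (fun j => (i, j)),
         zt.2 ++ (js'.filter (fun j => decide (cellv g i j = 2))).map (fun j => (i, j))) := by
    intro i js'
    induction js' with
    | nil => intro zt; simp
    | cons j t ihj =>
      intro zt
      simp only [List.foldl_cons]
      by_cases h0 : cellv g i j = 0
      · have h2 : ¬ cellv g i j = 2 := by rw [h0]; norm_num
        simp only [if_pos h0, if_neg h2, ihj]
        simp [h0]
      · by_cases h2 : cellv g i j = 2
        · simp only [if_neg h0, if_pos h2, ihj]
          simp [h2, List.append_assoc]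
        · simp only [if_neg h0, if_neg h2, ihj]
          simp [h0, h2]
  have houter : ∀ (is' : List Int) (zt : List (Int × Int) × List (Int × Int)),
      is'.foldl (fun zt i =>
        js.foldl (fun (zt : List (Int × Int) × List (Int × Int)) j =>
          let zt1 := if cellv g i j = 0 then (zt.1 ++ [(i, j)], zt.2) else zt
          if cellv g i j = 2 then (zt1.1, zt1.2 ++ [(i, j)]) else zt1) zt) zt
      = (zt.1 ++ zerosB g is' js, zt.2 ++ twosB g is' js) := by
    intro is'
    induction is' with
    | nil => intro zt; simp [zerosB, twosB]
    | cons i t iht =>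
      intro zt
      rw [List.foldl_cons, iht, hrow]
      simp [zerosB, twosB, List.append_assoc]
  unfold scanA
  rw [houter]
  simp

-- ---- B's wall placement equals A's ----

lemma wallsB_eq (g : List (List Int)) (w : (Int × Int) × (Int × Int) × (Int × Int)) :
    [w.1, w.2.1, w.2.2].foldl (fun a p => setCell a p.1 p.2 1) g = wallsA g w := by
  simp [wallsA, List.foldl]

lemma walls_zero (g : List (List Int)) (w : (Int × Int) × (Int × Int) × (Int × Int)) :
    ∀ r c : Int, cellv (wallsA g w) r c = 0 → cellv g r c = 0 := by
  intro r c h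
  unfold wallsA at h
  rcases cellv_setCell_cases (setCell (setCell g w.1.1 w.1.2 1) w.2.1.1 w.2.1.2 1)
      w.2.2.1 w.2.2.2 1 r c with h1 | h1
  · rw [h] at h1; norm_num at h1
  · rw [h1] at h
    rcases cellv_setCell_cases (setCell g w.1.1 w.1.2 1) w.2.1.1 w.2.1.2 1 r c with h2 | h2
    · rw [h] at h2; norm_num at h2
    · rw [h2] at h
      rcases cellv_setCell_cases g w.1.1 w.1.2 1 r c with h3 | h3
      · rw [h] at h3; norm_num at h3
      · rw [h3] at h; exact h

-- ---- B's seed loop yields a marked-and-closed grid ----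

lemma dfs_fold_spec (A0 : List (List Int)) (n m : Int) (seeds : List (Int × Int)) :
    ∀ (ss : List (Int × Int)), (∀ s ∈ ss, s ∈ seeds) →
      ∀ a, Good A0 n m seeds a →
        (∀ p : Int × Int, Changed A0 a p → ClosedAt n m a p) →
        Good A0 n m seeds (ss.foldl (fun a p => spreadF n m (zcount a + 1) a p.1 p.2) a) ∧
        GExt a (ss.foldl (fun a p => spreadF n m (zcount a + 1) a p.1 p.2) a) ∧
        (∀ p : Int × Int,
          Changed A0 (ss.foldl (fun a p => spreadF n m (zcount a + 1) a p.1 p.2) a) p →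
          ClosedAt n m (ss.foldl (fun a p => spreadF n m (zcount a + 1) a p.1 p.2) a) p) ∧
        (∀ s ∈ ss, ClosedAt n m (ss.foldl (fun a p => spreadF n m (zcount a + 1) a p.1 p.2) a) s) := by
  intro ss
  induction ss with
  | nil =>
    intro _ a hG hH
    exact ⟨hG, gext_refl _, hH, by simp⟩
  | cons s t iht =>
    intro hss a hG hH
    simp only [List.foldl_cons]
    obtain ⟨hG1, hE1, hz1, hC1⟩ :=
      spread_spec A0 n m seeds (zcount a + 1) a s.1 s.2 hG
        (Or.inl (by simpa using hss s List.mem_cons_self)) (Nat.lt_succ_self _)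
    have hH1 : ∀ p : Int × Int,
        Changed A0 (spreadF n m (zcount a + 1) a s.1 s.2) p →
        ClosedAt n m (spreadF n m (zcount a + 1) a s.1 s.2) p := by
      intro p hp
      by_cases hch : Changed a (spreadF n m (zcount a + 1) a s.1 s.2) p
      · exact hC1 p (Or.inr hch)
      · have he : cellv (spreadF n m (zcount a + 1) a s.1 s.2) p.1 p.2
            = cellv a p.1 p.2 := by by_contra hne; exact hch hne
        have hch' : Changed A0 a p := by rwa [Changed, he] at hp
        exact closedAt_mono hE1 (hH p hch')
    obtain ⟨hG2, hE2, hH2, hS2⟩ :=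
      iht (fun s' hs' => hss s' (List.mem_cons_of_mem _ hs'))
        (spreadF n m (zcount a + 1) a s.1 s.2) hG1 hH1
    refine ⟨hG2, gext_trans hE1 hE2, hH2, ?_⟩
    intro s' hs'
    rcases List.mem_cons.mp hs' with rfl | hs'
    · refine closedAt_mono hE2 ?_
      have := hC1 (s'.1, s'.2) (Or.inl rfl)
      simpa using this
    · exact hS2 s' hs'

-- ---- the two counts agree on pointwise-equal floods ----

lemma count_eq (g FA FB : List (List Int)) (is js : List Int)
    (hpt : ∀ r c : Int, cellv FA r c = cellv FB r c)
    (himp : ∀ r c : Int, cellv FB r c = 0 → cellv g r c = 0) :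
    countA FA is js = countB FB (zerosB g is js) := by
  have hrow : ∀ (i : Int) (js' : List Int) (s : Int),
      js'.foldl (fun (cnt : Int) c => if cellv FA i c = 0 then cnt + 1 else cnt) s
      = ((js'.filter (fun j => decide (cellv g i j = 0))).map (fun j => ((i : Int), j))).foldl
          (fun (s : Int) p => if cellv FB p.1 p.2 = 0 then s + 1 else s) s := by
    intro i js'
    induction js' with
    | nil => intro s; rfl
    | cons j t ihj =>
      intro s
      rw [List.foldl_cons]
      by_cases hFB : cellv FB i j = 0
      · have hFA : cellv FA i j = 0 := by rw [hpt]; exact hFB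
        have hg0 : cellv g i j = 0 := himp i j hFB
        rw [if_pos hFA, ihj]
        simp [hg0, hFB]
      · have hFA : ¬ cellv FA i j = 0 := by rw [hpt]; exact hFB
        rw [if_neg hFA, ihj]
        by_cases hg0 : cellv g i j = 0
        · simp [hg0, hFB]
        · simp [hg0]
  unfold countA countB zerosB
  have hall : ∀ (is' : List Int) (s : Int),
      is'.foldl (fun cnt r =>
        js.foldl (fun (cnt : Int) c => if cellv FA r c = 0 then cnt + 1 else cnt) cnt) s
      = (is'.flatMap (fun i =>
          (js.filter (fun j => decide (cellv g i j = 0))).map (fun j => (i, j)))).foldl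
          (fun (s : Int) p => if cellv FB p.1 p.2 = 0 then s + 1 else s) s := by
    intro is'
    induction is' with
    | nil => intro s; rfl
    | cons i t iht =>
      intro s
      rw [List.foldl_cons, List.flatMap_cons, List.foldl_append, hrow, iht]
  exact hall is 0

-- ---- per-combination: the BFS flood count equals the DFS flood count ----

lemma combo_count (g : List (List Int)) (n m : Int) (seeds : List (Int × Int))
    (A0 : List (List Int)) (hA0 : ∀ r c : Int, cellv A0 r c = 0 → cellv g r c = 0)
    (is js : List Int) :
    countA (bfsRun n m (5 * zcount A0 + seeds.length + 1) A0 seeds) is js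
      = countB (dfsAll n m seeds A0) (zerosB g is js) := by
  unfold dfsAll
  obtain ⟨hGA, hCA⟩ :=
    bfs_spec A0 n m seeds (5 * zcount A0 + seeds.length + 1) A0 seeds
      (fun _ _ => Or.inl rfl) (fun p hp => Or.inl hp)
      (fun p hp hnp => by
        rcases hp with hs | hch
        · exact absurd hs hnp
        · exact absurd rfl hch)
      (by omega)
  obtain ⟨hGB, hEB, hHB, hSB⟩ :=
    dfs_fold_spec A0 n m seeds seeds (fun s hs => hs) A0
      (fun _ _ => Or.inl rfl) (fun p hp => absurd rfl hp)
  have hCB : ∀ p : Int × Int,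
      (p ∈ seeds ∨ Changed A0 (seeds.foldl (fun a p => spreadF n m (zcount a + 1) a p.1 p.2) A0) p) →
      ClosedAt n m (seeds.foldl (fun a p => spreadF n m (zcount a + 1) a p.1 p.2) A0) p := by
    intro p hp
    rcases hp with hs | hch
    · exact hSB p hs
    · exact hHB p hch
  have hpt : ∀ r c : Int,
      cellv (bfsRun n m (5 * zcount A0 + seeds.length + 1) A0 seeds) r c
        = cellv (seeds.foldl (fun a p => spreadF n m (zcount a + 1) a p.1 p.2) A0) r c := by
    intro r c
    by_cases hR : Reach A0 n m seeds (r, c)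
    · have h1 := final_char_reach hGA hCA (r, c) hR
      have h2 := final_char_reach hGB hCB (r, c) hR
      simp only at h1 h2
      rw [h1, h2]
    · have h1 := final_char_not hGA (p := (r, c)) hR
      have h2 := final_char_not hGB (p := (r, c)) hR
      simp only at h1 h2
      rw [h1, h2]
  have himp : ∀ r c : Int, cellv (seeds.foldl (fun a p => spreadF n m (zcount a + 1) a p.1 p.2) A0) r c = 0 → cellv g r c = 0 := by
    intro r c h
    by_cases hR : Reach A0 n m seeds (r, c)
    · have h2 := final_char_reach hGB hCB (r, c) hR
      simp only at h2
      rw [h2] at h; norm_num at h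
    · have h2 := final_char_not hGB (p := (r, c)) hR
      simp only at h2
      rw [h2] at h
      exact hA0 r c h
  exact count_eq g _ _ is js hpt himp

-- ---- fold over the same combinations with pointwise-equal bodies ----

lemma foldl_funext {α β : Type} (f g : β → α → β) (h : ∀ b x, f b x = g b x) :
    ∀ (l : List α) (b : β), l.foldl f b = l.foldl g b := by
  intro l
  induction l with
  | nil => intro b; rfl
  | cons x t ih => intro b; rw [List.foldl_cons, List.foldl_cons, h, ih]

-- ===== VERDICT (by name: the statement is the Claim_ definition above) =====
theorem solution_spec : Claim_equal_solution := by
  unfold Claim_equal_solution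
  intro grid _ _
  unfold Spec_solution solution solution_alt
  simp only [scanA_eq]
  refine foldl_funext _ _ ?_ _ _
  intro mx w
  rw [wallsB_eq]
  rw [combo_count grid (grid.length : Int) ((grid.headD []).length : Int)
    (twosB grid (PySem.List.pyRange 0 (grid.length : Int) 1)
      (PySem.List.pyRange 0 ((grid.headD []).length : Int) 1))
    (wallsA grid w) (walls_zero grid w)]
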